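-- pv_equiv track=rewrite | github.com/Derling/algorithms | python/string_compression.py | str_compress
-- ===== SOURCE A (Python) =====
-- def str_compress(string):
-- 	i, j = 0, 1
--
-- 	def remove_sequence(i, n): # removes a character that starts at index i and appears n times
-- 		while n:
-- 			string.pop(i)
-- 			n -= 1
--
-- 	while j < len(string):
-- 		if string[i] != string[j]:
-- 			if j - i > 2:
-- 				remove_sequence(i, j - i)
-- 				i = 0
-- 				j = 0
-- 			else:
-- 				i = j
-- 		j += 1
--
-- 	if string[i] == string[j - 1] and j - i > 2:
-- 		remove_sequence(i, j - i)
--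
-- 	return ''.join(string)
-- ===== SOURCE B (Python) =====
-- def str_compress(string):
--     # Single left-to-right pass over a stack of (element, run_count); a run longer
--     # than 2 is dropped when a different element arrives (merging the neighbours)
--     # or when it ends up on top at the end.  Does not mutate the input list.
--     stack = []
--     for ch in string:
--         if stack and stack[-1][0] == ch:
--             stack[-1] = (ch, stack[-1][1] + 1)
--         elif stack and stack[-1][1] > 2:
--             stack.pop()
--             if stack and stack[-1][0] == ch:
--                 stack[-1] = (ch, stack[-1][1] + 1)
--             else:
--                 stack.append((ch, 1))
--         else:
--             stack.append((ch, 1))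
--     if stack and stack[-1][1] > 2:
--         stack.pop()
--     return ''.join(c * n for c, n in stack)
-- ===== Notes on version B (the rewrite author's own statement) =====
-- stated objective: faster
-- what changed: A repeatedly rescans the list from index 0 after every removal (popping elements one by one); B makes a single left-to-right pass maintaining a stack of (element, run-count) pairs, popping a run longer than 2 when a different element arrives or at the end, so cascading merges are handled without any rescan.
import Mathlib
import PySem

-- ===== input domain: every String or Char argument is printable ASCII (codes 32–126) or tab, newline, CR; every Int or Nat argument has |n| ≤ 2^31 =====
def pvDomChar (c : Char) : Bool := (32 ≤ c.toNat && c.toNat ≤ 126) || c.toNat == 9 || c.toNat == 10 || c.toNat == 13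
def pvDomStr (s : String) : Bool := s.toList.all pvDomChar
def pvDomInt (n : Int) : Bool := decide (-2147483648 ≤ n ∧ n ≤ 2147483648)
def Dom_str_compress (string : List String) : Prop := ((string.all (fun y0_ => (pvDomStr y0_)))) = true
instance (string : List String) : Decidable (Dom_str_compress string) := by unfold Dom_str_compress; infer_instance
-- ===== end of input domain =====

-- B replaces A's rescan-from-zero removal loop by one stack pass of (element, run-count) pairs;
-- return values agree on non-empty inputs (A also mutates its argument in place, B does not —
-- only the return value is claimed here).

-- ===== PORT A =====
-- remove_sequence: 'while n: string.pop(i); n -= 1' (pop(i) = eraseIdx i, exact for in-range i,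
-- which is the only case reached on inputs satisfying Pre_).
def pvRemoveSeq : List String → Nat → Nat → List String
  | lst, _, 0 => lst
  | lst, i, n + 1 => pvRemoveSeq (lst.eraseIdx i) i n

-- termination helpers for the while-loop below (cited in decreasing_by)
theorem pvRemoveSeq_length_le (n : Nat) : ∀ (lst : List String) (i : Nat),
    (pvRemoveSeq lst i n).length ≤ lst.length := by
  induction n with
  | zero => intro lst i; simp [pvRemoveSeq]
  | succ n ih =>
    intro lst i
    calc (pvRemoveSeq (lst.eraseIdx i) i n).length ≤ (lst.eraseIdx i).length := ih _ _
      _ ≤ lst.length := by rw [List.length_eraseIdx]; split <;> omega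

theorem pvRemoveSeq_length_lt (lst : List String) (i n : Nat) (hi : i < lst.length)
    (hn : 0 < n) : (pvRemoveSeq lst i n).length < lst.length := by
  obtain ⟨m, rfl⟩ := Nat.exists_eq_succ_of_ne_zero (Nat.pos_iff_ne_zero.mp hn)
  calc (pvRemoveSeq (lst.eraseIdx i) i m).length ≤ (lst.eraseIdx i).length :=
        pvRemoveSeq_length_le m _ i
    _ < lst.length := by rw [List.length_eraseIdx]; split <;> omega

-- the 'while j < len(string)' loop; state = (string, i, j); indexing string[i]/string[j] is
-- in range on every state reached from a Pre_ input, where getD is exact.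
def pvLoopA (lst : List String) (i j : Nat) : List String × Nat × Nat :=
  if h : j < lst.length then
    if lst.getD i "" ≠ lst.getD j "" then
      if hbig : j - i > 2 then
        pvLoopA (pvRemoveSeq lst i (j - i)) 0 1
      else
        pvLoopA lst j (j + 1)
    else
      pvLoopA lst i (j + 1)
  else
    (lst, i, j)
termination_by (lst.length, lst.length - j)
decreasing_by
  · exact Prod.Lex.left _ _ (pvRemoveSeq_length_lt lst i (j - i) (by omega) (by omega))
  · exact Prod.Lex.right _ (by omega)
  · exact Prod.Lex.right _ (by omega)

-- the final 'if string[i] == string[j - 1] and j - i > 2' fix-up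
def pvFinishA (s : List String × Nat × Nat) : List String :=
  if s.1.getD s.2.1 "" = s.1.getD (s.2.2 - 1) "" ∧ s.2.2 - s.2.1 > 2 then
    pvRemoveSeq s.1 s.2.1 (s.2.2 - s.2.1)
  else s.1

def str_compress (string : List String) : String :=
  PySem.Str.join "" (pvFinishA (pvLoopA string 0 1))

-- ===== PORT B =====
-- Python keeps the stack top at the END of the list; the port keeps the top at the HEAD
-- (same pushes/pops/updates, orientation reversed once at the end).
def pvStepB (st : List (String × Nat)) (ch : String) : List (String × Nat) :=
  match st with
  | [] => [(ch, 1)]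
  | (c, n) :: rest =>
    if c = ch then (c, n + 1) :: rest
    else if n > 2 then
      match rest with
      | [] => [(ch, 1)]
      | (c2, n2) :: r2 => if c2 = ch then (c2, n2 + 1) :: r2 else (ch, 1) :: (c2, n2) :: r2
    else (ch, 1) :: (c, n) :: rest

-- 'c * n' on a Python str repeats its code points: pyRepeat on toList, exact.
def pvRepStr (p : String × Nat) : String :=
  String.ofList (PySem.List.pyRepeat p.1.toList (p.2 : Int))

def str_compress_alt (string : List String) : String :=
  let st := string.foldl pvStepB []
  let st2 := match st with
    | [] => ([] : List (String × Nat))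
    | (c, n) :: rest => if n > 2 then rest else (c, n) :: rest
  PySem.Str.join "" (st2.reverse.map pvRepStr)

-- ===== PRECONDITION & SPEC =====
-- Pre_ excludes only the empty list, on which A raises IndexError at 'string[i]'.
def Pre_str_compress (string : List String) : Prop := string ≠ []
instance (string : List String) : Decidable (Pre_str_compress string) := by
  unfold Pre_str_compress; infer_instance

def pvWitness_str_compress : List String := ["a", "a", "a", "b"]

def Spec_str_compress (string : List String) (out : String) : Prop := out = str_compress_alt string
instance (string : List String) (out : String) : Decidable (Spec_str_compress string out) := by
  unfold Spec_str_compress; infer_instance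

-- ===== CLAIM (what is proved, stated in full; the proofs are below) =====
def Claim_equal_str_compress : Prop := ∀ (string : List String), Dom_str_compress string →
  Pre_str_compress string → Spec_str_compress string (str_compress string)

-- ===== LEMMAS AND PROOFS =====

-- run-length decomposition of a prefix, top run at the head (proof device)
def pvPushRun (st : List (String × Nat)) (ch : String) : List (String × Nat) :=
  match st with
  | [] => [(ch, 1)]
  | (c, n) :: r => if c = ch then (c, n + 1) :: r else (ch, 1) :: (c, n) :: r

def pvRunsRev (u : List String) : List (String × Nat) := u.foldl pvPushRun []

-- loop invariant of pvLoopA: the scanned prefix decomposes into runs, the current run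
-- [i, j) on top, every completed run of length ≤ 2
def pvInvA (lst : List String) (i j : Nat) : Prop :=
  i < j ∧ j ≤ lst.length ∧ lst.getD (j - 1) "" = lst.getD i "" ∧
  pvRunsRev (lst.take j) = (lst.getD i "", j - i) :: pvRunsRev (lst.take i) ∧
  ∀ r ∈ pvRunsRev (lst.take i), r.2 ≤ 2

theorem pvRemoveSeq_eq (n : Nat) : ∀ (lst : List String) (i : Nat), i + n ≤ lst.length →
    pvRemoveSeq lst i n = lst.take i ++ lst.drop (i + n) := by
  induction n with
  | zero => intro lst i h; simp [pvRemoveSeq]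
  | succ n ih =>
    intro lst i h
    have hi : i < lst.length := by omega
    rw [pvRemoveSeq, ih _ i (by rw [List.length_eraseIdx]; split <;> omega),
      List.eraseIdx_eq_take_drop_succ]
    congr 1
    · rw [List.take_append_of_le_length (by simp; omega), List.take_take]
      simp
    · rw [List.drop_append]
      simp only [List.length_take, Nat.min_def, if_pos hi.le]
      rw [List.drop_drop, List.drop_eq_nil_of_le (by simp)]
      simp only [List.nil_append]
      congr 1
      omega

theorem pvRunsRev_append_singleton (u : List String) (x : String) :
    pvRunsRev (u ++ [x]) = pvPushRun (pvRunsRev u) x := by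
  simp [pvRunsRev, List.foldl_append]

-- while no completed run is longer than 2, B's stack IS the run decomposition
theorem pvFoldl_stepB_eq_runsRev (u : List String)
    (h : ∀ r ∈ (pvRunsRev u).tail, r.2 ≤ 2) : u.foldl pvStepB [] = pvRunsRev u := by
  induction u using List.reverseRecOn with
  | nil => rfl
  | append_singleton v x ih =>
    rw [pvRunsRev_append_singleton] at h ⊢
    have hv : ∀ r ∈ (pvRunsRev v).tail, r.2 ≤ 2 := by
      intro r hr
      cases hs : pvRunsRev v with
      | nil => simp [hs] at hr
      | cons q t =>
        obtain ⟨c, m⟩ := q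
        rw [hs] at hr h
        by_cases hc : c = x
        · exact h r (by simp [pvPushRun, hc] at h ⊢; simpa [hs, hc] using hr)
        · exact h r (by simp [pvPushRun, hc]; right; simp at hr; tauto)
    rw [List.foldl_append, List.foldl_cons, List.foldl_nil, ih hv]
    cases hs : pvRunsRev v with
    | nil => rfl
    | cons q t =>
      obtain ⟨c, m⟩ := q
      by_cases hc : c = x
      · simp [pvStepB, pvPushRun, hc]
      · have hm : m ≤ 2 := h (c, m) (by rw [hs]; simp [pvPushRun, hc])
        simp [pvStepB, pvPushRun, hc, show ¬ m > 2 by omega]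

-- dropping a finished run of length > 2 from the stack top
theorem pvStepB_pop (c x : String) (n : Nat) (rest : List (String × Nat)) (hne : c ≠ x)
    (hn : n > 2) (hrest : ∀ q ∈ rest, q.2 ≤ 2) :
    pvStepB ((c, n) :: rest) x = pvStepB rest x := by
  cases rest with
  | nil => simp [pvStepB, hne, hn]
  | cons q r2 =>
    obtain ⟨c2, n2⟩ := q
    have h2 : n2 ≤ 2 := hrest (c2, n2) (by simp)
    by_cases hc2 : c2 = x <;>
      simp [pvStepB, hne, hn, hc2, show ¬ n2 > 2 by omega]

def pvCsum (l : List String) : List Char := (l.map String.toList).flatten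

theorem pvIntercalate_nil (xss : List (List Char)) : List.intercalate [] xss = xss.flatten := by
  unfold List.intercalate
  induction xss with
  | nil => rfl
  | cons h t ih =>
    cases t with
    | nil => simp
    | cons h2 t2 => simp_all [List.intersperse]

theorem pvJoin_eq (parts : List String) :
    PySem.Str.join "" parts = String.ofList (pvCsum parts) := by
  simp [PySem.Str.join, PySem.Chars.join, pvCsum, pvIntercalate_nil]

theorem pvCsum_append (a b : List String) : pvCsum (a ++ b) = pvCsum a ++ pvCsum b := by
  simp [pvCsum]

theorem pvRepStr_toList (c : String) (m : Nat) :
    (pvRepStr (c, m + 1)).toList = (pvRepStr (c, m)).toList ++ c.toList := by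
  simp [pvRepStr, PySem.List.pyRepeat, List.replicate_succ']

-- decoding the run decomposition gives back the characters of the prefix
theorem pvJoinRuns (u : List String) :
    pvCsum ((pvRunsRev u).reverse.map pvRepStr) = pvCsum u := by
  induction u using List.reverseRecOn with
  | nil => rfl
  | append_singleton v x ih =>
    rw [pvRunsRev_append_singleton, pvCsum_append]
    cases hs : pvRunsRev v with
    | nil =>
      rw [hs] at ih
      simp [pvCsum, pvPushRun, pvRepStr, PySem.List.pyRepeat] at ih ⊢
      exact ih
    | cons q t =>
      obtain ⟨c, m⟩ := q
      rw [hs] at ih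
      by_cases hc : c = x
      · subst hc
        rw [show pvPushRun ((c, m) :: t) c = (c, m + 1) :: t by simp [pvPushRun]]
        have : pvCsum (((c, m + 1) :: t).reverse.map pvRepStr)
            = pvCsum (((c, m) :: t).reverse.map pvRepStr) ++ c.toList := by
          simp only [List.reverse_cons, List.map_append, pvCsum_append, List.map_cons,
            List.map_nil]
          simp [pvCsum, pvRepStr_toList]
        rw [this, ih]
        simp [pvCsum]
      · simp only [pvPushRun, if_neg hc]
        simp only [List.reverse_cons, List.map_append, pvCsum_append, List.map_cons, List.map_nil]
        rw [show ((c,m) :: t).reverse = t.reverse ++ [(c,m)] by simp] at ih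
        simp only [List.map_append, pvCsum_append, List.map_cons, List.map_nil] at ih
        rw [ih]
        simp [pvCsum, pvRepStr, PySem.List.pyRepeat]

theorem pvPushRun_cons_eq (c : String) (n : Nat) (rest : List (String × Nat)) (ch : String)
    (h : c = ch) : pvPushRun ((c, n) :: rest) ch = (c, n + 1) :: rest := by
  simp [pvPushRun, h]

theorem pvPushRun_cons_ne (c : String) (n : Nat) (rest : List (String × Nat)) (ch : String)
    (h : c ≠ ch) : pvPushRun ((c, n) :: rest) ch = (ch, 1) :: (c, n) :: rest := by
  simp [pvPushRun, h]

theorem pvInvA_init (l : List String) (hl : l ≠ []) : pvInvA l 0 1 := by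
  cases l with
  | nil => exact absurd rfl hl
  | cons a t =>
    refine ⟨Nat.zero_lt_one, by simp, rfl, ?_, by simp [pvRunsRev]⟩
    simp [pvRunsRev, pvPushRun]

theorem pvAlt_congr (l1 l2 : List String) (h : l1.foldl pvStepB [] = l2.foldl pvStepB []) :
    str_compress_alt l1 = str_compress_alt l2 := by
  simp only [str_compress_alt, h]

theorem pvMain : ∀ (lst : List String) (i j : Nat), pvInvA lst i j →
    PySem.Str.join "" (pvFinishA (pvLoopA lst i j)) = str_compress_alt lst := by
  intro lst i j
  induction lst, i, j using pvLoopA.induct with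
  | case1 lst i j h hne hbig ih =>
    intro hinv
    obtain ⟨hij, hjle, hlast, hruns, hcnt⟩ := hinv
    have hstep : pvLoopA lst i j = pvLoopA (pvRemoveSeq lst i (j - i)) 0 1 := by
      rw [pvLoopA, dif_pos h, if_pos hne, dif_pos hbig]
    have hij3 : i + 3 ≤ j := by omega
    have hr_eq : pvRemoveSeq lst i (j - i) = lst.take i ++ lst.drop j := by
      rw [pvRemoveSeq_eq (j - i) lst i (by omega), show i + (j - i) = j by omega]
    have hrne : pvRemoveSeq lst i (j - i) ≠ [] := by
      rw [hr_eq]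
      intro hcon
      have := congrArg List.length hcon
      simp at this
      omega
    rw [hstep, ih (pvInvA_init _ hrne)]
    -- B consumes lst and the list with the run removed to the same stack
    apply pvAlt_congr
    have hxj : lst.getD j "" = lst[j] := List.getD_eq_getElem lst "" h
    have hdropj : lst.drop j = lst.getD j "" :: lst.drop (j + 1) := by
      rw [List.drop_eq_getElem_cons h, hxj]
    have htail : ∀ r ∈ (pvRunsRev (lst.take j)).tail, r.2 ≤ 2 := by
      rw [hruns]; exact fun r hr => hcnt r (by simpa using hr)
    have htaili : ∀ r ∈ (pvRunsRev (lst.take i)).tail, r.2 ≤ 2 := by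
      intro r hr
      exact hcnt r (List.mem_of_mem_tail hr)
    have hpop : pvStepB ((lst.getD i "", j - i) :: pvRunsRev (lst.take i)) (lst.getD j "")
        = pvStepB (pvRunsRev (lst.take i)) (lst.getD j "") :=
      pvStepB_pop _ _ _ _ hne hbig hcnt
    calc (pvRemoveSeq lst i (j - i)).foldl pvStepB []
        = (lst.drop j).foldl pvStepB ((lst.take i).foldl pvStepB []) := by
          rw [hr_eq, List.foldl_append]
      _ = (lst.drop (j + 1)).foldl pvStepB
            (pvStepB (pvRunsRev (lst.take i)) (lst.getD j "")) := by
          rw [pvFoldl_stepB_eq_runsRev _ htaili, hdropj, List.foldl_cons]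
      _ = (lst.drop (j + 1)).foldl pvStepB
            (pvStepB ((lst.getD i "", j - i) :: pvRunsRev (lst.take i)) (lst.getD j "")) := by
          rw [hpop]
      _ = (lst.drop j).foldl pvStepB (pvRunsRev (lst.take j)) := by
          rw [hruns, hdropj, List.foldl_cons]
      _ = lst.foldl pvStepB [] := by
          conv_rhs => rw [← List.take_append_drop j lst]
          rw [List.foldl_append, pvFoldl_stepB_eq_runsRev _ htail]
  | case2 lst i j h hne hbig ih =>
    intro hinv
    obtain ⟨hij, hjle, hlast, hruns, hcnt⟩ := hinv
    have hstep : pvLoopA lst i j = pvLoopA lst j (j + 1) := by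
      rw [pvLoopA, dif_pos h, if_pos hne, dif_neg hbig]
    have htake : lst.take (j + 1) = lst.take j ++ [lst.getD j ""] := by
      rw [List.take_add_one, List.getElem?_eq_getElem h, List.getD_eq_getElem lst "" h]
      rfl
    rw [hstep]
    apply ih
    refine ⟨Nat.lt_succ_self j, by omega, by simp, ?_, ?_⟩
    · rw [htake, pvRunsRev_append_singleton, hruns,
        pvPushRun_cons_ne _ _ _ _ (fun hcon : lst.getD i "" = lst.getD j "" => hne hcon),
        show j + 1 - j = 1 by omega]
    · rw [hruns]
      intro r hr
      rcases List.mem_cons.mp hr with hr1 | hr2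
      · subst hr1; simpa using by omega
      · exact hcnt r hr2
  | case3 lst i j h heq ih =>
    intro hinv
    obtain ⟨hij, hjle, hlast, hruns, hcnt⟩ := hinv
    have heq' : lst.getD i "" = lst.getD j "" := by
      by_contra hcon; exact heq hcon
    have hstep : pvLoopA lst i j = pvLoopA lst i (j + 1) := by
      rw [pvLoopA, dif_pos h, if_neg heq]
    have htake : lst.take (j + 1) = lst.take j ++ [lst.getD j ""] := by
      rw [List.take_add_one, List.getElem?_eq_getElem h, List.getD_eq_getElem lst "" h]
      rfl
    rw [hstep]
    apply ih
    refine ⟨by omega, by omega, by simpa using heq'.symm, ?_, hcnt⟩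
    rw [htake, pvRunsRev_append_singleton, hruns, pvPushRun_cons_eq _ _ _ _ heq',
      show j + 1 - i = (j - i) + 1 by omega]
  | case4 lst i j h =>
    intro hinv
    obtain ⟨hij, hjle, hlast, hruns, hcnt⟩ := hinv
    have hjlen : j = lst.length := by omega
    have hloop : pvLoopA lst i j = (lst, i, j) := by
      rw [pvLoopA]; simp [h]
    have htakeall : lst.take j = lst := by rw [hjlen, List.take_length]
    rw [htakeall] at hruns
    have hfold : lst.foldl pvStepB [] = pvRunsRev lst :=
      pvFoldl_stepB_eq_runsRev _ (by rw [hruns]; exact fun r hr => hcnt r (by simpa using hr))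
    rw [hloop]
    by_cases hbig : j - i > 2
    · have hcond : lst.getD i "" = lst.getD (j - 1) "" ∧ j - i > 2 := ⟨hlast.symm, hbig⟩
      have hfin : pvFinishA (lst, i, j) = lst.take i := by
        show (if lst.getD i "" = lst.getD (j - 1) "" ∧ j - i > 2 then
          pvRemoveSeq lst i (j - i) else lst) = lst.take i
        rw [if_pos hcond, pvRemoveSeq_eq (j - i) lst i (by omega),
          show i + (j - i) = j by omega, hjlen, List.drop_length, List.append_nil]
      rw [hfin, str_compress_alt]
      simp only [hfold, hruns]
      rw [if_pos hbig]
      rw [pvJoin_eq, pvJoin_eq]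
      exact congrArg String.ofList (pvJoinRuns (lst.take i)).symm
    · have hfin : pvFinishA (lst, i, j) = lst := by
        show (if lst.getD i "" = lst.getD (j - 1) "" ∧ j - i > 2 then
          pvRemoveSeq lst i (j - i) else lst) = lst
        rw [if_neg (fun hcon => hbig hcon.2)]
      rw [hfin, str_compress_alt]
      simp only [hfold, hruns]
      rw [if_neg hbig, ← hruns]
      rw [pvJoin_eq, pvJoin_eq]
      exact congrArg String.ofList (pvJoinRuns lst).symm

-- ===== VERDICT (by name: the statement is the Claim_ definition above) =====
theorem str_compress_spec : Claim_equal_str_compress := by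
  intro string _ hpre
  unfold Spec_str_compress
  unfold str_compress
  exact pvMain string 0 1 (pvInvA_init string hpre)
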